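-- pv_equiv track=rewrite | github.com/paulklemstine/factor | visuals/old/lean1/FactorOld/Factoring/Pythagorean Factoring/python/10_visual_explorer.py | triples_from_leg
-- ===== SOURCE A (Python) =====
-- import math
--
-- def triples_from_leg(n):
--     n_sq = n * n
--     triples = []
--     for d in range(1, int(math.isqrt(n_sq)) + 1):
--         if n_sq % d != 0:
--             continue
--         e = n_sq // d
--         if d >= e or (d + e) % 2 != 0:
--             continue
--         b = (e - d) // 2
--         c = (e + d) // 2
--         if b > 0:
--             triples.append((n, b, c))
--     return triples
-- ===== SOURCE B (Python) =====
-- import math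
--
-- def triples_from_leg(n):
--     # Factor-free divisor enumeration: divisors of n (scan to sqrt(|n|)),
--     # then every divisor of n^2 is a product of two divisors of |n|.
--     m = abs(n)
--     small = [i for i in range(1, math.isqrt(m) + 1) if m % i == 0]
--     divs = set(small)
--     divs.update(m // i for i in small)
--     products = sorted({a * b for a in divs for b in divs})
--     result = []
--     for d in products:
--         e = (m * m) // d
--         if d < e and (d + e) % 2 == 0:
--             result.append((n, (e - d) // 2, (e + d) // 2))
--     return result
-- ===== Notes on version B (the rewrite author's own statement) =====
-- stated objective: faster
-- what changed: Instead of testing every candidate divisor d of n^2 up to |n|, B finds the divisors of |n| by scanning only to isqrt(|n|), forms all pairwise products (every divisor of n^2 dividing evenly is such a product), sorts them, and filters in one pass.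
import Mathlib
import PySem

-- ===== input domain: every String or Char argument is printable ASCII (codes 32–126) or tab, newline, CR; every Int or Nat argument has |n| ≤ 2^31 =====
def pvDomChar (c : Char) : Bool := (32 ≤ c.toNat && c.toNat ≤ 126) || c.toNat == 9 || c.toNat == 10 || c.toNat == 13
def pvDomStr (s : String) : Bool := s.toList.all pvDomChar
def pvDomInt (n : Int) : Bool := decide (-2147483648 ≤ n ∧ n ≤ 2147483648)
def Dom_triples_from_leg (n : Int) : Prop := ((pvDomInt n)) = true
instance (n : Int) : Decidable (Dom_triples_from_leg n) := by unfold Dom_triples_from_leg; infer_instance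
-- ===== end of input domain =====

-- B enumerates the divisors of n² as products of two divisors of |n| found by scanning only
-- to isqrt(|n|), instead of A's scan of every candidate up to |n| (objective: faster).

-- ===== PORT A =====
-- math.isqrt(x) for x ≥ 0 is Nat.sqrt of x.toNat (exact; the argument n*n is always ≥ 0).
def triples_from_leg (n : Int) : List (List Int) :=
  let n_sq := n * n
  (PySem.List.pyRange 1 (((n_sq.toNat.sqrt : Nat) : Int) + 1) 1).foldl
    (fun triples d =>
      if PySem.Int.mod n_sq d ≠ 0 then triples
      else
        let e := PySem.Int.floordiv n_sq d
        if d ≥ e ∨ PySem.Int.mod (d + e) 2 ≠ 0 then triples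
        else
          let b := PySem.Int.floordiv (e - d) 2
          let c := PySem.Int.floordiv (e + d) 2
          if b > 0 then triples ++ [[n, b, c]] else triples)
    []

-- ===== PORT B =====
-- transliteration of Source B: abs(n); small divisors by scan to isqrt(|n|); divisor set of |n|;
-- set comprehension of pairwise products; sorted; one filtering pass.
def triples_from_leg_alt (n : Int) : List (List Int) :=
  let m := if n < 0 then -n else n
  let small := (PySem.List.pyRange 1 (((m.toNat.sqrt : Nat) : Int) + 1) 1).filter
      (fun i => PySem.Int.mod m i == 0)
  let divs := PySem.Set.update (PySem.Set.ofList small)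
      (small.map (fun i => PySem.Int.floordiv m i))
  let products := PySem.List.sorted
      (PySem.Set.ofList (divs.flatMap (fun a => divs.map (fun b => a * b)))) (fun x => x) false
  products.foldl
    (fun result d =>
      let e := PySem.Int.floordiv (m * m) d
      if d < e ∧ PySem.Int.mod (d + e) 2 = 0 then
        result ++ [[n, PySem.Int.floordiv (e - d) 2, PySem.Int.floordiv (e + d) 2]]
      else result)
    []

-- ===== PRECONDITION & SPEC =====
def Spec_triples_from_leg (n : Int) (out : List (List Int)) : Prop := out = triples_from_leg_alt n
instance (n : Int) (out : List (List Int)) : Decidable (Spec_triples_from_leg n out) := by unfold Spec_triples_from_leg; infer_instance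

-- ===== CLAIM (what is proved, stated in full; the proofs are below) =====
def Claim_equal_triples_from_leg : Prop := ∀ (n : Int), Dom_triples_from_leg n → Spec_triples_from_leg n (triples_from_leg n)

-- ===== LEMMAS AND PROOFS =====

-- e(d) = n² // d, the cofactor; shared by both loop bodies.
def pvE (n d : Int) : Int := PySem.Int.floordiv (n * n) d

def pvF (n d : Int) : List Int :=
  [n, PySem.Int.floordiv (pvE n d - d) 2, PySem.Int.floordiv (pvE n d + d) 2]

-- A's accumulated condition on d.
def pvQA (n d : Int) : Bool :=
  decide (PySem.Int.mod (n * n) d = 0) && decide (d < pvE n d) &&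
  decide (PySem.Int.mod (d + pvE n d) 2 = 0) &&
  decide (0 < PySem.Int.floordiv (pvE n d - d) 2)

-- B's condition on d.
def pvQB (n d : Int) : Bool :=
  decide (d < pvE n d) && decide (PySem.Int.mod (d + pvE n d) 2 = 0)

-- B's intermediate lists (definitionally the port's let-bound values at m).
def pvSmall (m : Int) : List Int :=
  (PySem.List.pyRange 1 ((m.toNat.sqrt : Int) + 1) 1).filter (fun i => PySem.Int.mod m i == 0)

def pvDivs (m : Int) : List Int :=
  PySem.Set.update (PySem.Set.ofList (pvSmall m)) ((pvSmall m).map (fun i => PySem.Int.floordiv m i))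

def pvProducts (m : Int) : List Int :=
  PySem.List.sorted
    (PySem.Set.ofList ((pvDivs m).flatMap (fun a => (pvDivs m).map (fun b => a * b))))
    (fun x => x) false

-- two strictly increasing integer lists with the same members are equal
theorem pv_eq_of_pairwise_lt {l1 l2 : List Int}
    (h1 : l1.Pairwise (· < ·)) (h2 : l2.Pairwise (· < ·))
    (hm : ∀ x, x ∈ l1 ↔ x ∈ l2) : l1 = l2 := by
  induction l1 generalizing l2 with
  | nil =>
    cases l2 with
    | nil => rfl
    | cons y t => exact absurd ((hm y).2 (by simp)) (by simp)
  | cons x t ih =>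
    cases l2 with
    | nil => exact absurd ((hm x).1 (by simp)) (by simp)
    | cons y s =>
      have hx : x = y := by
        rcases List.mem_cons.1 ((hm x).1 (by simp)) with h | h
        · exact h
        · rcases List.mem_cons.1 ((hm y).2 (by simp)) with h' | h'
          · exact h'.symm
          · have := (List.pairwise_cons.1 h1).1 y h'
            have := (List.pairwise_cons.1 h2).1 x h
            omega
      subst hx
      have ht : t = s := by
        apply ih (List.pairwise_cons.1 h1).2 (List.pairwise_cons.1 h2).2
        intro z
        constructor
        · intro hz
          have hzx : x < z := (List.pairwise_cons.1 h1).1 z hz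
          rcases List.mem_cons.1 ((hm z).1 (by simp [hz])) with h | h
          · omega
          · exact h
        · intro hz
          have hzx : x < z := (List.pairwise_cons.1 h2).1 z hz
          rcases List.mem_cons.1 ((hm z).2 (by simp [hz])) with h | h
          · omega
          · exact h
      rw [ht]

theorem pv_A_shape (n : Int) :
    triples_from_leg n =
      ((PySem.List.pyRange 1 (((n * n).toNat.sqrt : Int) + 1) 1).filter (pvQA n)).map (pvF n) := by
  show List.foldl
      (fun (triples : List (List Int)) (d : Int) =>
        if PySem.Int.mod (n * n) d ≠ 0 then triples
        else
          let e := PySem.Int.floordiv (n * n) d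
          if d ≥ e ∨ PySem.Int.mod (d + e) 2 ≠ 0 then triples
          else
            let b := PySem.Int.floordiv (e - d) 2
            let c := PySem.Int.floordiv (e + d) 2
            if b > 0 then triples ++ [[n, b, c]] else triples)
      [] (PySem.List.pyRange 1 (((n * n).toNat.sqrt : Int) + 1) 1) = _
  have hb : (fun (triples : List (List Int)) (d : Int) =>
      if PySem.Int.mod (n * n) d ≠ 0 then triples
      else
        let e := PySem.Int.floordiv (n * n) d
        if d ≥ e ∨ PySem.Int.mod (d + e) 2 ≠ 0 then triples
        else
          let b := PySem.Int.floordiv (e - d) 2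
          let c := PySem.Int.floordiv (e + d) 2
          if b > 0 then triples ++ [[n, b, c]] else triples)
      = (fun triples d => if pvQA n d then triples ++ [pvF n d] else triples) := by
    funext t d
    simp only [pvQA, pvF, pvE]
    split_ifs with h1 h2 h3 <;> simp_all <;> omega
  rw [hb, PySem.List.foldl_append_if]
  simp

theorem pv_B_shape (n : Int) :
    triples_from_leg_alt n =
      ((pvProducts ((n.natAbs : Nat) : Int)).filter (pvQB n)).map (pvF n) := by
  have hm : (if n < 0 then -n else n) = ((n.natAbs : Nat) : Int) := by split_ifs <;> omega
  show List.foldl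
      (fun (result : List (List Int)) (d : Int) =>
        let e := PySem.Int.floordiv ((if n < 0 then -n else n) * (if n < 0 then -n else n)) d
        if d < e ∧ PySem.Int.mod (d + e) 2 = 0 then
          result ++ [[n, PySem.Int.floordiv (e - d) 2, PySem.Int.floordiv (e + d) 2]]
        else result)
      [] (pvProducts (if n < 0 then -n else n)) = _
  rw [hm]
  have hnn : ((n.natAbs : Nat) : Int) * ((n.natAbs : Nat) : Int) = n * n := by
    have := Int.natAbs_mul_self (a := n)
    push_cast at this ⊢
    linarith
  have hb : (fun (result : List (List Int)) (d : Int) =>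
      let e := PySem.Int.floordiv (((n.natAbs : Nat) : Int) * ((n.natAbs : Nat) : Int)) d
      if d < e ∧ PySem.Int.mod (d + e) 2 = 0 then
        result ++ [[n, PySem.Int.floordiv (e - d) 2, PySem.Int.floordiv (e + d) 2]]
      else result)
      = (fun result d => if pvQB n d then result ++ [pvF n d] else result) := by
    funext r d
    show (if d < PySem.Int.floordiv (((n.natAbs : Nat) : Int) * ((n.natAbs : Nat) : Int)) d ∧
            PySem.Int.mod (d + PySem.Int.floordiv (((n.natAbs : Nat) : Int) * ((n.natAbs : Nat) : Int)) d) 2 = 0 then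
          _ else _) = _
    rw [hnn]
    by_cases h : d < pvE n d ∧ PySem.Int.mod (d + pvE n d) 2 = 0
    · rw [if_pos (by simpa [pvE] using h),
        if_pos (by simp only [pvQB, Bool.and_eq_true, decide_eq_true_eq]; exact h)]
      simp [pvF, pvE]
    · rw [if_neg (by simpa [pvE] using h),
        if_neg (by simp only [pvQB, Bool.and_eq_true, decide_eq_true_eq]; exact h)]
  rw [hb, PySem.List.foldl_append_if]
  simp

theorem pv_mem_small (m : Nat) (x : Int) :
    x ∈ pvSmall (m : Int) ↔ ∃ a : Nat, x = (a : Int) ∧ 1 ≤ a ∧ a ≤ Nat.sqrt m ∧ a ∣ m := by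
  simp only [pvSmall, List.mem_filter, PySem.List.mem_pyRange_one, Int.toNat_natCast]
  constructor
  · rintro ⟨⟨h1, h2⟩, h3⟩
    refine ⟨x.toNat, by omega, by omega, by omega, ?_⟩
    have : (x : Int) ∣ (m : Int) := (PySem.Int.mod_eq_zero_iff_dvd _ _).1 (by simpa using h3)
    have h4 := Int.natAbs_dvd_natAbs.2 this
    have h5 : x.natAbs = x.toNat := by omega
    simpa [h5] using h4
  · rintro ⟨a, rfl, h1, h2, h3⟩
    refine ⟨⟨by exact_mod_cast h1, by omega⟩, ?_⟩
    simp only [beq_iff_eq]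
    exact (PySem.Int.mod_eq_zero_iff_dvd _ _).2 (by exact_mod_cast h3)

theorem pv_mem_divs (m : Nat) (hm : 0 < m) (x : Int) :
    x ∈ pvDivs (m : Int) ↔ ∃ a : Nat, x = (a : Int) ∧ 0 < a ∧ a ∣ m := by
  simp only [pvDivs, PySem.Set.mem_update, PySem.Set.mem_ofList, List.mem_map]
  constructor
  · rintro (h | ⟨i, hi, rfl⟩)
    · rcases (pv_mem_small m x).1 h with ⟨a, rfl, h1, h2, h3⟩
      exact ⟨a, rfl, h1, h3⟩
    · rcases (pv_mem_small m i).1 hi with ⟨a, rfl, h1, h2, h3⟩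
      refine ⟨m / a, ?_, Nat.div_pos (Nat.le_of_dvd hm h3) h1, Nat.div_dvd_of_dvd h3⟩
      rw [PySem.Int.floordiv_natCast]
  · rintro ⟨a, rfl, h1, h2⟩
    by_cases hle : a ≤ Nat.sqrt m
    · exact Or.inl ((pv_mem_small m _).2 ⟨a, rfl, h1, hle, h2⟩)
    · right
      refine ⟨(m / a : Nat), (pv_mem_small m _).2 ⟨m / a, rfl, ?_, ?_, Nat.div_dvd_of_dvd h2⟩, ?_⟩
      · exact Nat.div_pos (Nat.le_of_dvd hm h2) h1
      · -- m / a ≤ sqrt m  since a ≥ sqrt m + 1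
        have h4 : m / a ≤ m / (Nat.sqrt m + 1) := Nat.div_le_div_left (by omega) (by omega)
        have h5 : m < (Nat.sqrt m + 1) * (Nat.sqrt m + 1) := by
          have := Nat.lt_succ_sqrt' m; simpa [pow_two, Nat.succ_eq_add_one] using this
        have h6 : m / (Nat.sqrt m + 1) ≤ Nat.sqrt m := by
          have := (Nat.div_lt_iff_lt_mul (by omega : 0 < Nat.sqrt m + 1)).2 h5
          omega
        omega
      · rw [PySem.Int.floordiv_natCast, Nat.div_div_self h2 (by omega)]

theorem pv_mem_products (m : Nat) (hm : 0 < m) (x : Int) :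
    x ∈ pvProducts (m : Int) ↔
      ∃ a b : Nat, x = ((a * b : Nat) : Int) ∧ 0 < a ∧ a ∣ m ∧ 0 < b ∧ b ∣ m := by
  simp only [pvProducts, PySem.List.mem_sorted, PySem.Set.mem_ofList, List.mem_flatMap,
    List.mem_map]
  constructor
  · rintro ⟨a, ha, b, hb, rfl⟩
    rcases (pv_mem_divs m hm a).1 ha with ⟨a', rfl, ha1, ha2⟩
    rcases (pv_mem_divs m hm b).1 hb with ⟨b', rfl, hb1, hb2⟩
    exact ⟨a', b', by push_cast; ring, ha1, ha2, hb1, hb2⟩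
  · rintro ⟨a, b, rfl, ha1, ha2, hb1, hb2⟩
    exact ⟨(a : Int), (pv_mem_divs m hm _).2 ⟨a, rfl, ha1, ha2⟩,
           (b : Int), (pv_mem_divs m hm _).2 ⟨b, rfl, hb1, hb2⟩, by push_cast; ring⟩

theorem pv_filter_eq (n : Int) (hn : n ≠ 0) :
    (PySem.List.pyRange 1 ((n.natAbs : Int) + 1) 1).filter (pvQA n)
      = (pvProducts (n.natAbs : Int)).filter (pvQB n) := by
  have hM : 0 < n.natAbs := by omega
  have hnn : n * n = ((n.natAbs * n.natAbs : Nat) : Int) := (Int.natAbs_mul_self).symm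
  apply pv_eq_of_pairwise_lt
  · exact (PySem.List.pairwise_lt_pyRange_one 1 _).filter _
  · exact (PySem.List.sorted_ofList_pairwise_lt _).filter _
  · intro x
    simp only [List.mem_filter, PySem.List.mem_pyRange_one, pv_mem_products _ hM, pvQA, pvQB,
      Bool.and_eq_true, decide_eq_true_eq]
    constructor
    · rintro ⟨⟨hx1, hx2⟩, ⟨⟨hmod, hlt⟩, hpar⟩, hbpos⟩
      have hdvd : x ∣ n * n := (PySem.Int.mod_eq_zero_iff_dvd _ _).1 hmod
      have h4 := Int.natAbs_dvd_natAbs.2 hdvd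
      rw [Int.natAbs_mul] at h4
      obtain ⟨a, b, ha, hb, hab⟩ := exists_dvd_and_dvd_of_dvd_mul h4
      refine ⟨⟨a, b, ?_, ?_, ha, ?_, hb⟩, hlt, hpar⟩
      · have : x.natAbs = a * b := hab
        omega
      · rcases Nat.eq_zero_or_pos a with h | h
        · subst h; simp at hab; omega
        · exact h
      · rcases Nat.eq_zero_or_pos b with h | h
        · subst h; simp at hab; omega
        · exact h
    · rintro ⟨⟨a, b, rfl, ha1, ha2, hb1, hb2⟩, hlt, hpar⟩
      have hx1 : (1 : Int) ≤ ((a * b : Nat) : Int) := by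
        have : 0 < a * b := Nat.mul_pos ha1 hb1
        omega
      have hdvd : ((a * b : Nat) : Int) ∣ n * n := by
        rw [hnn]
        exact_mod_cast Nat.mul_dvd_mul ha2 hb2
      refine ⟨⟨hx1, ?_⟩, ⟨⟨(PySem.Int.mod_eq_zero_iff_dvd _ _).2 hdvd, hlt⟩, hpar⟩, ?_⟩
      · -- x < |n| + 1  from x < e = n²/x
        have he : ((a * b : Nat) : Int) * pvE n ((a * b : Nat) : Int) = n * n := by
          rw [pvE, PySem.Int.floordiv_eq_ediv_of_pos (by omega)]
          exact Int.mul_ediv_cancel' hdvd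
        have hsq : ((a * b : Nat) : Int) * ((a * b : Nat) : Int) < n * n := by
          calc ((a * b : Nat) : Int) * ((a * b : Nat) : Int)
              < ((a * b : Nat) : Int) * pvE n ((a * b : Nat) : Int) :=
                mul_lt_mul_of_pos_left hlt (by omega)
            _ = n * n := he
        rw [hnn] at hsq
        have hsq' : a * b * (a * b) < n.natAbs * n.natAbs := by exact_mod_cast hsq
        have := Nat.mul_self_lt_mul_self_iff.1 hsq'
        omega
      · -- 0 < (e - x) // 2  from x < e and parity of x + e
        rw [PySem.Int.floordiv_eq_ediv_of_pos (by omega)]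
        rw [PySem.Int.mod_eq_emod_of_pos (by omega)] at hpar
        omega

-- ===== VERDICT (by name: the statement is the Claim_ definition above) =====
theorem triples_from_leg_spec : Claim_equal_triples_from_leg := by
  intro n _
  unfold Spec_triples_from_leg
  by_cases hn : n = 0
  · subst hn; decide
  · rw [pv_A_shape, pv_B_shape]
    have hsqrt : (n * n).toNat.sqrt = n.natAbs := by
      have : n * n = ((n.natAbs * n.natAbs : Nat) : Int) := (Int.natAbs_mul_self).symm
      rw [this, Int.toNat_natCast, ← pow_two]
      exact Nat.sqrt_eq' n.natAbs
    rw [hsqrt, pv_filter_eq n hn]
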